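-- pv_equiv track=rewrite | github.com/taqiyeddinedj/tme3 | code.py | build_finger
-- ===== SOURCE A (Python) =====
-- import math
--
-- Nmax = 64
--
-- def build_finger(i, candidates):
--     # Initialisation de la table des doigts
--     finger_table = []
--
--     # Trier les candidats
--     sorted_candidates = sorted(candidates)
--
--     # Déterminer la taille maximale du finger table (log2(Nmax))
--     m = int(math.log2(Nmax))  # Nmax doit être défini (par exemple, 64)
--
--     # Construction de la table des doigts
--     for k in range(m):
--         target = (i + 2**k) % Nmax  # Calcul du point cible pour l'entrée k
--         for candidate in sorted_candidates:
--             if candidate >= target and candidate != i:  # Exclure i (le nœud lui-même)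
--                 finger_table.append(candidate)
--                 break
--         else:
--             # Si aucun candidat ne correspond, prendre le premier (cycle de l'anneau)
--             if sorted_candidates[0] != i:  # Exclure i s'il est le premier
--                 finger_table.append(sorted_candidates[0])
--
--     # Retourner la table des doigts sans doublons et respectant l'ordre
--     return sorted(set(finger_table), key=finger_table.index)
-- ===== SOURCE B (Python) =====
-- import math
--
-- Nmax = 64
--
-- def build_finger(i, candidates):
--     # Per slot k, pick the smallest candidate >= target (excluding i) by a
--     # filter+min instead of sorting and scanning; dedupe with dict.fromkeys.
--     m = int(math.log2(Nmax))
--     finger_table = []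
--     for k in range(m):
--         target = (i + 2**k) % Nmax
--         matches = [c for c in candidates if c >= target and c != i]
--         if matches:
--             finger_table.append(min(matches))
--         else:
--             first = min(candidates)
--             if first != i:
--                 finger_table.append(first)
--     return list(dict.fromkeys(finger_table))
-- ===== Notes on version B (the rewrite author's own statement) =====
-- stated objective: simpler
-- what changed: Replaces sort-then-linear-scan-with-for/else per slot by a direct filter+min per slot (no sorting at all) and replaces sorted(set(...), key=list.index) by dict.fromkeys dedup.
import Mathlib
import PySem

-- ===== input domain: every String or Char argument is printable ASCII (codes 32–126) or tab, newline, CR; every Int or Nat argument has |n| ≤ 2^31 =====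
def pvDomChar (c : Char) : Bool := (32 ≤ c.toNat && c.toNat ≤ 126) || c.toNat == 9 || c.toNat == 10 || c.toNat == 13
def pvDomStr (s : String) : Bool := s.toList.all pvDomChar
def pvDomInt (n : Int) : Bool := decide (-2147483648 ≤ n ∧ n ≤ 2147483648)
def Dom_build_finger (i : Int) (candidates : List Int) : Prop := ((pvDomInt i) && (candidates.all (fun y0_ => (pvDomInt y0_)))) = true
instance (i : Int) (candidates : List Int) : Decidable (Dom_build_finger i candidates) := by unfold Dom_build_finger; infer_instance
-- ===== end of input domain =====

-- B replaces A's sort-then-scan-with-for/else per slot by a direct filter+min per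
-- slot (no sorting), and A's sorted(set(...), key=list.index) by dict.fromkeys dedup.

-- ===== PORT A =====
-- the inner 'for candidate in sorted_candidates: if …: append; break / else: …' scan
def scanA (target i : Int) : List Int → Option Int
  | [] => none
  | c :: rest => if target ≤ c ∧ c ≠ i then some c else scanA target i rest

def build_finger (i : Int) (candidates : List Int) : List Int :=
  let sorted_candidates := PySem.List.sorted candidates (fun x => x) false
  -- m = int(math.log2(Nmax)) with Nmax = 64: log2(64) = 6.0 exactly, so m = 6
  let finger_table := (PySem.List.pyRange 0 6 1).foldl (fun ft k =>
      let target := PySem.Int.mod (i + 2 ^ k.toNat) 64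
      match scanA target i sorted_candidates with
      | some c => ft ++ [c]
      | none =>
        -- sorted_candidates[0]: IndexError on the empty list (excluded by Pre_)
        match PySem.List.pyGet? sorted_candidates 0 with
        | some h => if h ≠ i then ft ++ [h] else ft
        | none => ft) []
  PySem.List.sorted (PySem.Set.ofList finger_table)
    (fun x => (PySem.List.index? finger_table x).getD 0) false

-- ===== PORT B =====
def build_finger_alt (i : Int) (candidates : List Int) : List Int :=
  let finger_table := (PySem.List.pyRange 0 6 1).foldl (fun ft k =>
      let target := PySem.Int.mod (i + 2 ^ k.toNat) 64
      let ms := candidates.filter (fun c => decide (target ≤ c ∧ c ≠ i))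
      match PySem.List.min? ms (fun x => x) with
      | some v => ft ++ [v]
      | none =>
        -- min(candidates): ValueError on the empty list (excluded by Pre_)
        match PySem.List.min? candidates (fun x => x) with
        | some first => if first ≠ i then ft ++ [first] else ft
        | none => ft) []
  PySem.List.dedup finger_table

-- ===== PRECONDITION & SPEC =====
-- Pre_ excludes exactly the empty candidate list, on which A raises IndexError.
def Pre_build_finger (i : Int) (candidates : List Int) : Prop := candidates ≠ []
instance (i : Int) (candidates : List Int) : Decidable (Pre_build_finger i candidates) := by unfold Pre_build_finger; infer_instance
def pvWitness_build_finger : Int × List Int := (10, [3, 17, 40, 63, 10])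

def Spec_build_finger (i : Int) (candidates : List Int) (out : List Int) : Prop := out = build_finger_alt i candidates
instance (i : Int) (candidates : List Int) (out : List Int) : Decidable (Spec_build_finger i candidates out) := by unfold Spec_build_finger; infer_instance

-- ===== CLAIM (what is proved, stated in full; the proofs are below) =====
def Claim_equal_build_finger : Prop := ∀ (i : Int) (candidates : List Int), Dom_build_finger i candidates → Pre_build_finger i candidates → Spec_build_finger i candidates (build_finger i candidates)

-- ===== LEMMAS AND PROOFS =====

theorem foldl_ext' {α β : Type} (f g : α → β → α) (h : ∀ a b, f a b = g a b) :
    ∀ (l : List β) (init : α), l.foldl f init = l.foldl g init := by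
  intro l
  induction l with
  | nil => intro init; rfl
  | cons x xs ih => intro init; simp only [List.foldl_cons, h, ih]

-- first minimum characterisation of Python's min on ints
theorem min?_id_of (l : List Int) (v : Int) (hv : v ∈ l) (hmin : ∀ y ∈ l, v ≤ y) :
    PySem.List.min? l (fun x => x) = some v := by
  cases hml : PySem.List.min? l (fun x => x) with
  | none =>
    rw [PySem.List.min?_eq_none_iff] at hml
    subst hml; cases hv
  | some w =>
    have hwmem : w ∈ l := PySem.List.min?_mem hml
    have h1 : w ≤ v := by simpa using PySem.List.min?_isMin hml v hv
    have h2 : v ≤ w := hmin w hwmem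
    exact congrArg some (le_antisymm h1 h2)

theorem scan_none {t i : Int} : ∀ {sc : List Int}, scanA t i sc = none →
    ∀ c ∈ sc, ¬(t ≤ c ∧ c ≠ i) := by
  intro sc
  induction sc with
  | nil => intro _ c hc; cases hc
  | cons c rest ih =>
    intro h x hx
    unfold scanA at h
    split at h
    · exact absurd h (by simp)
    · rcases List.mem_cons.mp hx with rfl | hx'
      · assumption
      · exact ih h x hx'

theorem scan_some {t i : Int} : ∀ {sc : List Int}, sc.Pairwise (fun a b => a ≤ b) →
    ∀ {v : Int}, scanA t i sc = some v →
    v ∈ sc ∧ (t ≤ v ∧ v ≠ i) ∧ ∀ y ∈ sc, (t ≤ y ∧ y ≠ i) → v ≤ y := by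
  intro sc
  induction sc with
  | nil => intro _ v h; cases h
  | cons c rest ih =>
    intro hpw v h
    rw [List.pairwise_cons] at hpw
    obtain ⟨hle, hrest⟩ := hpw
    unfold scanA at h
    split at h
    · rename_i hc
      obtain rfl : c = v := by injection h
      refine ⟨List.mem_cons_self .., hc, ?_⟩
      intro y hy _
      rcases List.mem_cons.mp hy with rfl | hy'
      · exact le_refl _
      · exact hle y hy'
    · rename_i hc
      obtain ⟨hmem, hp, hmin⟩ := ih hrest h
      refine ⟨List.mem_cons_of_mem _ hmem, hp, ?_⟩
      intro y hy hpy
      rcases List.mem_cons.mp hy with rfl | hy'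
      · exact absurd hpy hc
      · exact hmin y hy' hpy

-- A's scan of the sorted list computes B's min over the filtered candidates
theorem scan_eq_min (i : Int) (candidates : List Int) (t : Int) :
    scanA t i (PySem.List.sorted candidates (fun x => x) false) =
    PySem.List.min? (candidates.filter (fun c => decide (t ≤ c ∧ c ≠ i))) (fun x => x) := by
  have hperm : (PySem.List.sorted candidates (fun x => x) false).Perm candidates :=
    PySem.List.sorted_perm candidates (fun x => x) false
  have hpw : (PySem.List.sorted candidates (fun x => x) false).Pairwise (fun a b => a ≤ b) := by
    simpa using PySem.List.sorted_pairwise candidates (fun x => x)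
  cases hscan : scanA t i (PySem.List.sorted candidates (fun x => x) false) with
  | none =>
    have hfil : candidates.filter (fun c => decide (t ≤ c ∧ c ≠ i)) = [] := by
      rw [List.filter_eq_nil_iff]
      intro a ha
      have hmem : a ∈ PySem.List.sorted candidates (fun x => x) false := hperm.mem_iff.mpr ha
      simpa using scan_none hscan a hmem
    rw [hfil]
    exact ((PySem.List.min?_eq_none_iff _ _).mpr rfl).symm
  | some v =>
    obtain ⟨hvmem, hpv, hmin⟩ := scan_some hpw hscan
    refine (min?_id_of _ v ?_ ?_).symm
    · exact List.mem_filter.mpr ⟨hperm.mem_iff.mp hvmem, by simpa using hpv⟩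
    · intro y hy
      obtain ⟨hyc, hyp⟩ := List.mem_filter.mp hy
      exact hmin y (hperm.mem_iff.mpr hyc) (by simpa using hyp)

-- A's sorted_candidates[0] computes B's min(candidates) (both none on the empty list)
theorem head_sorted_eq_min (candidates : List Int) :
    PySem.List.pyGet? (PySem.List.sorted candidates (fun x => x) false) 0 =
    PySem.List.min? candidates (fun x => x) := by
  cases hsc : PySem.List.sorted candidates (fun x => x) false with
  | nil =>
    have hc : candidates = [] := (PySem.List.sorted_eq_nil_iff _ _ _).mp hsc
    subst hc
    decide
  | cons h tl =>
    rw [PySem.List.pyGet?_zero_cons]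
    refine (min?_id_of _ h ?_ ?_).symm
    · exact (PySem.List.mem_sorted _ _ _ _).mp (hsc ▸ List.mem_cons_self ..)
    · intro y hy
      simpa using PySem.List.key_head_sorted_le _ _ hsc y hy

-- the final sorted(set(ft), key=ft.index) is first-occurrence dedup
theorem pairwise_index_ofList (l : List Int) :
    (PySem.Set.ofList l).Pairwise
      (fun a b => (PySem.List.index? l a).getD 0 ≤ (PySem.List.index? l b).getD 0) := by
  induction l using List.reverseRecOn with
  | nil => constructor
  | append_singleton l x ih =>
    have hof : PySem.Set.ofList (l ++ [x]) = PySem.Set.add (PySem.Set.ofList l) x := by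
      simp [PySem.Set.ofList_eq_foldl, List.foldl_append]
    rw [hof]
    have hidx : ∀ a ∈ PySem.Set.ofList l,
        PySem.List.index? (l ++ [x]) a = PySem.List.index? l a := by
      intro a ha
      exact PySem.List.index?_append_of_mem [x] ((PySem.Set.mem_ofList _ _).mp ha)
    have hpw : (PySem.Set.ofList l).Pairwise
        (fun a b => (PySem.List.index? (l ++ [x]) a).getD 0 ≤
                    (PySem.List.index? (l ++ [x]) b).getD 0) := by
      refine List.Pairwise.imp_of_mem ?_ ih
      intro a b ha hb hab
      rw [hidx a ha, hidx b hb]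
      exact hab
    by_cases hx : x ∈ l
    · have : PySem.Set.add (PySem.Set.ofList l) x = PySem.Set.ofList l := by
        simp [PySem.Set.add, PySem.Set.contains, PySem.Set.mem_ofList, hx]
      rw [this]; exact hpw
    · have : PySem.Set.add (PySem.Set.ofList l) x = PySem.Set.ofList l ++ [x] := by
        simp [PySem.Set.add, PySem.Set.contains, PySem.Set.mem_ofList, hx]
      rw [this, List.pairwise_append]
      refine ⟨hpw, by constructor <;> simp, ?_⟩
      intro a ha b hb
      have hbx : b = x := by simpa using hb
      have hal : a ∈ l := (PySem.Set.mem_ofList _ _).mp ha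
      obtain ⟨k, hk⟩ := Option.isSome_iff_exists.mp
        ((PySem.List.index?_isSome_iff l a).mpr hal)
      obtain ⟨hklt, -, -⟩ := PySem.List.getElem_of_index?_eq_some hk
      rw [hidx a ha, hk, hbx, PySem.List.index?_append_singleton_self l x hx]
      simpa using Nat.le_of_lt hklt
    
theorem final_eq (L : List Int) :
    PySem.List.sorted (PySem.Set.ofList L)
      (fun x => (PySem.List.index? L x).getD 0) false = PySem.List.dedup L := by
  rw [PySem.List.dedup_eq_ofList]
  exact PySem.List.sorted_eq_self_of_pairwise _ _ (pairwise_index_ofList L)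

-- ===== VERDICT (by name: the statement is the Claim_ definition above) =====
theorem build_finger_spec : Claim_equal_build_finger := by
  intro i candidates _hdom _hpre
  unfold Spec_build_finger
  simp only [build_finger, build_finger_alt]
  rw [final_eq]
  congr 1
  apply foldl_ext'
  intro ft k
  rw [scan_eq_min i candidates, head_sorted_eq_min]
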